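-- pv_equiv track=rewrite | github.com/dangerousLefty/pythonSnippets | dp_climbingStairs.py | climbStairsFollowUp
-- ===== SOURCE A (Python) =====
-- def climbStairsFollowUp(steps: int, increment: int) -> int:
--     stepArr = [0 for i in range(steps + 1)]
--     stepArr[0] = 1
--     stepArr[1] = 1
--
--     for i in range(2, len(stepArr)):
--         for j in range(1, increment+1):
--             if j > i:
--                 continue
--             stepArr[i] += stepArr[i-j]
--
--     return stepArr[steps]
-- ===== SOURCE B (Python) =====
-- def climbStairsFollowUp(steps: int, increment: int) -> int:
--     k = max(0, increment)
--     dp = [1, 1]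
--     s = sum(dp[max(0, 2 - k):2])  # window sum of the last min(2, k) values, for i = 2
--     for i in range(2, steps + 1):
--         dp.append(s)
--         s += dp[i] - (dp[i - k] if i - k >= 0 else 0)
--     return dp[steps]
-- ===== Notes on version B (the rewrite author's own statement) =====
-- stated objective: faster
-- what changed: Replaces A's quadratic DP (for each stair, an inner loop re-summing the previous `increment` entries) by a single pass that maintains a sliding-window running sum of the last `increment` DP values, updated in O(1) per stair.
import Mathlib
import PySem

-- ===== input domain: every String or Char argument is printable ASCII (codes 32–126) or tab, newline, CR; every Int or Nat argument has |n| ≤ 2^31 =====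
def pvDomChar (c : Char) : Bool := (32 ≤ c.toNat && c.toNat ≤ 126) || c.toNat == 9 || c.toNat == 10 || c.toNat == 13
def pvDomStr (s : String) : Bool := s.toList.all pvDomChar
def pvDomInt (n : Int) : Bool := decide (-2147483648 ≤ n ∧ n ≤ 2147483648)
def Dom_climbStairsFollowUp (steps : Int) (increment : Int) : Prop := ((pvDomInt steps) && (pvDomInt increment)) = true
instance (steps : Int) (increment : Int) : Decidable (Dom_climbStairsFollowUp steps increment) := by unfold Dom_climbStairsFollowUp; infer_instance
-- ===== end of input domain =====

-- B replaces A's per-stair inner re-summation by a sliding-window running sum (one O(1) update per stair).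


-- ===== PORT A =====
-- stepArr = [0 for i in range(steps+1)]; stepArr[0]=1; stepArr[1]=1; nested loops; return stepArr[steps]
-- pySetD/pyGetD are exact for in-range indices, which Pre_ (steps ≥ 1) and the loop guard j ≤ i guarantee.
def climbStairsFollowUp (steps : Int) (increment : Int) : Int :=
  let stepArr : List Int := (PySem.List.pyRange 0 (steps + 1) 1).map (fun _ => 0)
  let stepArr := PySem.List.pySetD stepArr 0 1
  let stepArr := PySem.List.pySetD stepArr 1 1
  let stepArr := (PySem.List.pyRange 2 (stepArr.length : Int) 1).foldl (fun arr i =>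
      (PySem.List.pyRange 1 (increment + 1) 1).foldl (fun arr j =>
        if j > i then arr
        else PySem.List.pySetD arr i (PySem.List.pyGetD arr i 0 + PySem.List.pyGetD arr (i - j) 0)) arr)
    stepArr
  PySem.List.pyGetD stepArr steps 0

-- ===== PORT B =====
-- k = max(0, increment); dp = [1,1]; s = sum(dp[max(0,2-k):2]);
-- for i in range(2, steps+1): dp.append(s); s += dp[i] - (dp[i-k] if i-k >= 0 else 0); return dp[steps]
def climbStairsFollowUp_alt (steps : Int) (increment : Int) : Int :=
  let k : Int := max 0 increment
  let dp : List Int := [1, 1]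
  let s : Int := (PySem.List.slice dp (some (max 0 (2 - k))) (some 2)).sum
  let r := (PySem.List.pyRange 2 (steps + 1) 1).foldl (fun (st : List Int × Int) i =>
      let dp := st.1 ++ [st.2]
      let s := st.2 + PySem.List.pyGetD dp i 0 -
        (if i - k ≥ 0 then PySem.List.pyGetD dp (i - k) 0 else 0)
      (dp, s)) (dp, s)
  PySem.List.pyGetD r.1 steps 0

-- ===== PRECONDITION & SPEC =====
-- A writes stepArr[1] (and reads stepArr[steps]) so it raises IndexError for every steps ≤ 0; exactly those inputs are excluded.
def Pre_climbStairsFollowUp (steps : Int) (increment : Int) : Prop := 1 ≤ steps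
instance (steps : Int) (increment : Int) : Decidable (Pre_climbStairsFollowUp steps increment) := by unfold Pre_climbStairsFollowUp; infer_instance
def pvWitness_climbStairsFollowUp : Int × Int := (5, 2)

def Spec_climbStairsFollowUp (steps : Int) (increment : Int) (out : Int) : Prop := out = climbStairsFollowUp_alt steps increment
instance (steps : Int) (increment : Int) (out : Int) : Decidable (Spec_climbStairsFollowUp steps increment out) := by unfold Spec_climbStairsFollowUp; infer_instance

-- ===== CLAIM (what is proved, stated in full; the proofs are below) =====
def Claim_equal_climbStairsFollowUp : Prop := ∀ (steps : Int) (increment : Int), Dom_climbStairsFollowUp steps increment → Pre_climbStairsFollowUp steps increment → Spec_climbStairsFollowUp steps increment (climbStairsFollowUp steps increment)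

-- ===== LEMMAS AND PROOFS =====

-- sum of the last n entries of d (n clamps at d.length)
def winSum (d : List Int) (n : Nat) : Int := (d.reverse.take n).sum

-- one outer iteration of A (its inner j-loop), as a named step function
def stepA (inc : Int) (arr : List Int) (i : Int) : List Int :=
  (PySem.List.pyRange 1 (inc + 1) 1).foldl (fun arr j =>
    if j > i then arr
    else PySem.List.pySetD arr i (PySem.List.pyGetD arr i 0 + PySem.List.pyGetD arr (i - j) 0)) arr

-- one iteration of B, as a named step function
def stepB (k : Int) (st : List Int × Int) (i : Int) : List Int × Int :=
  (st.1 ++ [st.2],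
   st.2 + PySem.List.pyGetD (st.1 ++ [st.2]) i 0 -
     (if i - k ≥ 0 then PySem.List.pyGetD (st.1 ++ [st.2]) (i - k) 0 else 0))

lemma winSum_succ_lt (d : List Int) (n : Nat) (h : n < d.length) :
    winSum d (n + 1) = winSum d n + d[d.length - (n + 1)]'(by omega) := by
  unfold winSum
  have h' : n < d.reverse.length := by simpa using h
  rw [List.take_succ, List.getElem?_eq_getElem h']
  simp only [Option.toList_some, List.sum_append, List.sum_cons, List.sum_nil, add_zero]
  congr 1
  rw [List.getElem_reverse]
  congr 1
  omega

lemma winSum_succ_ge (d : List Int) (n : Nat) (h : d.length ≤ n) :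
    winSum d (n + 1) = winSum d n := by
  unfold winSum
  rw [List.take_of_length_le (by simpa using by omega), List.take_of_length_le (by simpa using h)]

lemma winSum_append_succ (d : List Int) (v : Int) (m : Nat) :
    winSum (d ++ [v]) (m + 1) = v + winSum d m := by
  unfold winSum
  rw [List.reverse_append]
  simp

lemma innerAux (n : Nat) (d rest : List Int) (c : Int) :
    (List.range n).foldl
      (fun arr (t : Nat) =>
        if (1 + (t : Int)) > ((d.length : Nat) : Int) then arr
        else PySem.List.pySetD arr ((d.length : Nat) : Int)
          (PySem.List.pyGetD arr ((d.length : Nat) : Int) 0 +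
           PySem.List.pyGetD arr (((d.length : Nat) : Int) - (1 + (t : Int))) 0))
      (d ++ c :: rest)
    = d ++ (c + winSum d n) :: rest := by
  induction n with
  | zero => simp [winSum]
  | succ n ih =>
    rw [List.range_succ, List.foldl_append, ih, List.foldl_cons, List.foldl_nil]
    by_cases h : ((d.length : Nat) : Int) < 1 + (n : Int)
    · rw [if_pos h, winSum_succ_ge d n (by omega)]
    · rw [if_neg h]
      have hn : n + 1 ≤ d.length := by omega
      have hidx : ((d.length : Nat) : Int) - (1 + (n : Int)) = ((d.length - (n + 1) : Nat) : Int) := by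
        omega
      have hget1 : PySem.List.pyGetD (d ++ (c + winSum d n) :: rest) ((d.length : Nat) : Int) 0
          = c + winSum d n := by
        rw [PySem.List.pyGetD_natCast]
        simp [List.getD_eq_getElem?_getD]
      have hget2 : PySem.List.pyGetD (d ++ (c + winSum d n) :: rest)
            (((d.length : Nat) : Int) - (1 + (n : Int))) 0 = d[d.length - (n + 1)]'(by omega) := by
        rw [hidx, PySem.List.pyGetD_natCast]
        rw [List.getD_eq_getElem?_getD, List.getElem?_append_left (by omega)]
        rw [List.getElem?_eq_getElem (by omega)]
        rfl
      rw [hget1, hget2, PySem.List.pySetD_natCast, List.set_append]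
      rw [if_neg (by omega), Nat.sub_self]
      rw [List.set_cons_zero, winSum_succ_lt d n (by omega)]
      ring_nf

lemma stepA_eq (inc : Int) (d rest : List Int) (c : Int) :
    stepA inc (d ++ c :: rest) ((d.length : Nat) : Int) = d ++ (c + winSum d inc.toNat) :: rest := by
  unfold stepA
  rw [PySem.List.pyRange_one, show ((inc + 1 : Int) - 1) = inc by ring, List.foldl_map]
  exact innerAux inc.toNat d rest c

lemma winStep (d : List Int) (kN : Nat) (v : Int) (hv : v = winSum d kN) :
    v + PySem.List.pyGetD (d ++ [v]) ((d.length : Nat) : Int) 0 -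
      (if ((d.length : Nat) : Int) - ((kN : Nat) : Int) ≥ 0
       then PySem.List.pyGetD (d ++ [v]) (((d.length : Nat) : Int) - ((kN : Nat) : Int)) 0 else 0)
    = winSum (d ++ [v]) kN := by
  have hget : PySem.List.pyGetD (d ++ [v]) ((d.length : Nat) : Int) 0 = v := by
    rw [PySem.List.pyGetD_natCast]
    simp [List.getD_eq_getElem?_getD]
  rw [hget]
  rcases kN with _ | m
  · rw [if_pos (by omega)]
    have : ((d.length : Nat) : Int) - ((0 : Nat) : Int) = ((d.length : Nat) : Int) := by omega
    rw [this, hget]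
    have hv0 : v = 0 := by simpa [winSum] using hv
    simp [winSum, hv0]
  · by_cases hle : m + 1 ≤ d.length
    · rw [if_pos (by omega)]
      have hidx : ((d.length : Nat) : Int) - ((m + 1 : Nat) : Int)
          = ((d.length - (m + 1) : Nat) : Int) := by omega
      have hget2 : PySem.List.pyGetD (d ++ [v]) (((d.length : Nat) : Int) - ((m + 1 : Nat) : Int)) 0
          = d[d.length - (m + 1)]'(by omega) := by
        rw [hidx, PySem.List.pyGetD_natCast]
        rw [List.getD_eq_getElem?_getD, List.getElem?_append_left (by omega)]
        rw [List.getElem?_eq_getElem (by omega)]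
        rfl
      rw [hget2, winSum_append_succ, hv, winSum_succ_lt d m (by omega)]
      ring
    · rw [if_neg (by omega)]
      rw [winSum_append_succ, hv, winSum_succ_ge d m (by omega)]
      ring

lemma s0_eq (inc : Int) :
    (PySem.List.slice ([1, 1] : List Int) (some (max 0 (2 - max 0 inc))) (some 2)).sum
      = winSum [1, 1] (max 0 inc).toNat := by
  rcases lt_trichotomy inc 1 with h | h | h
  · rw [max_eq_left (by omega : inc ≤ 0)]
    decide
  · subst h
    decide
  · rw [max_eq_right (by omega : (0 : Int) ≤ inc), max_eq_left (by omega : 2 - inc ≤ 0)]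
    have hc : (PySem.List.slice ([1, 1] : List Int) (some 0) (some 2)) = [1, 1] := by decide
    rw [hc]
    unfold winSum
    rw [List.take_of_length_le (by simp; omega)]
    decide

lemma mainInv (inc kI : Int) (kN : Nat) (hkI : kI = (kN : Int)) (hincN : inc.toNat = kN)
    (M : Nat) (s0 : Int) (hs0 : s0 = winSum [1, 1] kN) :
    ∀ m : Nat, m ≤ M →
      ((List.range m).foldl (fun st (t : Nat) => stepB kI st (2 + (t : Int))) (([1, 1] : List Int), s0)).1.length = m + 2 ∧
      ((List.range m).foldl (fun st (t : Nat) => stepB kI st (2 + (t : Int))) (([1, 1] : List Int), s0)).2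
        = winSum ((List.range m).foldl (fun st (t : Nat) => stepB kI st (2 + (t : Int))) (([1, 1] : List Int), s0)).1 kN ∧
      (List.range m).foldl (fun arr (t : Nat) => stepA inc arr (2 + (t : Int))) ([1, 1] ++ List.replicate M 0)
        = ((List.range m).foldl (fun st (t : Nat) => stepB kI st (2 + (t : Int))) (([1, 1] : List Int), s0)).1
            ++ List.replicate (M - m) (0 : Int) := by
  intro m
  induction m with
  | zero =>
    intro _
    exact ⟨rfl, hs0, rfl⟩
  | succ m ih =>
    intro hm
    obtain ⟨h1, h2, h3⟩ := ih (by omega)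
    simp only [List.range_succ, List.foldl_append, List.foldl_cons, List.foldl_nil]
    set Bm := (List.range m).foldl (fun st (t : Nat) => stepB kI st (2 + (t : Int))) (([1, 1] : List Int), s0) with hBm
    rw [h3]
    have hi : (2 + (m : Int)) = ((Bm.1.length : Nat) : Int) := by rw [h1]; push_cast; ring
    have hrep : List.replicate (M - m) (0 : Int) = 0 :: List.replicate (M - (m + 1)) 0 := by
      rw [show M - m = (M - (m + 1)) + 1 by omega, List.replicate_succ]
    refine ⟨by simp [stepB, h1], ?_, ?_⟩
    · simp only [stepB]
      rw [hi, hkI]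
      exact winStep Bm.1 kN Bm.2 h2
    · rw [hrep, hi, stepA_eq inc Bm.1 (List.replicate (M - (m + 1)) 0) 0]
      simp only [stepB]
      rw [hincN, ← h2]
      simp

theorem climbStairsFollowUp_spec : Claim_equal_climbStairsFollowUp := by
  unfold Claim_equal_climbStairsFollowUp
  intro steps inc hdom hpre
  unfold Spec_climbStairsFollowUp
  unfold Pre_climbStairsFollowUp at hpre
  set M := (steps - 1).toNat with hM
  have e1 : ((PySem.List.pyRange 0 (steps + 1) 1).map (fun _ => (0 : Int))) = List.replicate (M + 2) 0 := by
    rw [PySem.List.pyRange_one, List.map_map]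
    have hlen : ((steps + 1) - 0 : Int).toNat = M + 2 := by omega
    rw [hlen]
    simp [Function.comp_def]
  have e2 : PySem.List.pySetD (PySem.List.pySetD (List.replicate (M + 2) (0 : Int)) 0 1) 1 1
      = [1, 1] ++ List.replicate M 0 := by
    simp [PySem.List.pySetD_of_nonneg, List.replicate_succ]
  have e3 : (([1, 1] ++ List.replicate M (0 : Int)).length : Int) = ((M + 2 : Nat) : Int) := by
    simp; omega
  have e4 : PySem.List.pyRange 2 ((M + 2 : Nat) : Int) 1
      = (List.range M).map (fun (k : Nat) => (2 : Int) + (k : Int)) := by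
    rw [PySem.List.pyRange_one]
    congr 2
    omega
  have hA : climbStairsFollowUp steps inc
      = PySem.List.pyGetD ((List.range M).foldl (fun arr (t : Nat) => stepA inc arr (2 + (t : Int)))
          ([1, 1] ++ List.replicate M 0)) steps 0 := by
    simp only [climbStairsFollowUp]
    rw [e1, e2, e3, e4, List.foldl_map]
    rfl
  have f1 : PySem.List.pyRange 2 (steps + 1) 1
      = (List.range M).map (fun (k : Nat) => (2 : Int) + (k : Int)) := by
    rw [PySem.List.pyRange_one]
    congr 2
    omega
  have hB : climbStairsFollowUp_alt steps inc
      = PySem.List.pyGetD ((List.range M).foldl (fun st (t : Nat) => stepB (max 0 inc) st (2 + (t : Int)))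
          (([1, 1] : List Int),
           (PySem.List.slice ([1, 1] : List Int) (some (max 0 (2 - max 0 inc))) (some 2)).sum)).1 steps 0 := by
    simp only [climbStairsFollowUp_alt]
    rw [f1, List.foldl_map]
    rfl
  have hmax : inc.toNat = (max 0 inc).toNat := by
    rcases le_total inc 0 with h | h
    · rw [max_eq_left h]; omega
    · rw [max_eq_right h]
  obtain ⟨h1, h2, h3⟩ := mainInv inc (max 0 inc) (max 0 inc).toNat
    (Int.toNat_of_nonneg (le_max_left 0 inc)).symm hmax M
    ((PySem.List.slice ([1, 1] : List Int) (some (max 0 (2 - max 0 inc))) (some 2)).sum)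
    (s0_eq inc) M (le_refl M)
  rw [hA, hB, h3]
  simp
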